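-- pv_equiv track=rewrite | github.com/fenre/splunk-monitoring-use-cases | scripts/simulate_controltest.py | _coherence_check
-- ===== SOURCE A (Python) =====
-- def _coherence_check(
--     events: list[dict], literals: dict[str, set[str]]
-- ) -> list[str]:
--     """Return human-readable warnings where the SPL's ``index=`` /
--     ``source=`` / ``sourcetype=`` literals do not appear anywhere in
--     the positive fixture's events.
--
--     * Wildcarded literals (containing ``*``) are skipped — the
--       matching is structural, not glob-based, and we do not want to
--       run the regex engine just to say "cisco:* matches cisco:asa".
--     * Empty literal sets are skipped — nothing to coerce against.
--     * We only compare the fields that the fixture actually carries;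
--       a missing ``sourcetype`` field in the events is not a warning,
--       just a silence.
--     """
--     if not events:
--         return []
--     warnings: list[str] = []
--     for field in ("index", "source", "sourcetype"):
--         declared = {lit for lit in literals.get(field, set()) if "*" not in lit}
--         if not declared:
--             continue
--         observed = {
--             str(e.get(field)) for e in events if field in e and e.get(field)
--         }
--         if not observed:
--             # Fixture does not surface that field at all — silent.
--             continue
--         if declared.isdisjoint(observed):
--             warnings.append(
--                 f"SPL references {field}=" + ", ".join(sorted(declared))
--                 + f" but positive fixture events only carry {field}="
--                 + ", ".join(sorted(observed))
--             )
--     return warnings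
-- ===== SOURCE B (Python) =====
-- _FIELDS = ("index", "source", "sourcetype")
--
--
-- def _coherence_check(events, literals):
--     """Recursive over the field names; per field an early-exit existence scan
--     ("does ANY event carry one of the declared literals?") replaces the
--     build-both-sets-and-test-disjointness of the original; the observed set is
--     materialised only when a warning is actually emitted."""
--     if not events:
--         return []
--     return _check(_FIELDS, events, literals)
--
--
-- def _check(fields, events, literals):
--     if not fields:
--         return []
--     field, rest = fields[0], fields[1:]
--     tail = _check(rest, events, literals)
--     declared = sorted(lit for lit in set(literals.get(field, ())) if "*" not in lit)
--     if not declared: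
--         return tail
--     if any(field in e and e.get(field) and str(e.get(field)) in declared for e in events):
--         return tail  # coherent: some event already matches a declared literal
--     observed = sorted({str(e.get(field)) for e in events if field in e and e.get(field)})
--     if not observed:
--         return tail
--     return [
--         "SPL references %s=%s but positive fixture events only carry %s=%s"
--         % (field, ", ".join(declared), field, ", ".join(observed))
--     ] + tail
-- ===== Notes on version B (the rewrite author's own statement) =====
-- stated objective: alternative
-- what changed: B is recursive over the field names and, instead of materialising the observed-value set and testing set disjointness, runs an early-exit existence scan (any event whose field value is among the declared literals?); the observed set is built and sorted only in the branch that actually emits a warning.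
import Mathlib
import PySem

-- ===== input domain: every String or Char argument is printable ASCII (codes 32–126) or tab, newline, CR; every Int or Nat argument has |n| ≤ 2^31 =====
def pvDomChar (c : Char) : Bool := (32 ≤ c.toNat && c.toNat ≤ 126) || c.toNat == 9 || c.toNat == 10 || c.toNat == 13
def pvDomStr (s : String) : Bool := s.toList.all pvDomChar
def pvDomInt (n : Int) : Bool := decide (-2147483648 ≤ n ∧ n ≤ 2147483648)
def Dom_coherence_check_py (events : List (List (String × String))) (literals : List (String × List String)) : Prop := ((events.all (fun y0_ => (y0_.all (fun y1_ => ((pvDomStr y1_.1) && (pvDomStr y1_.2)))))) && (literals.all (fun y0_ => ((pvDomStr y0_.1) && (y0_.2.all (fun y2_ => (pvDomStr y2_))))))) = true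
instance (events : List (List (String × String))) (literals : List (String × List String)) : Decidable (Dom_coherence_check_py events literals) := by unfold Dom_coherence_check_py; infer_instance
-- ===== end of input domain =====

-- B is recursive over the field names and replaces A's build-both-sets-then-isdisjoint test
-- by an early-exit existence scan over the events, materialising the observed set only when a
-- warning is emitted (objective: alternative decomposition, same asymptotic cost).

-- ===== PORT A =====
-- literal transliteration of _coherence_check: for each of the three fields, build the
-- declared set from the literals dict, scan ALL events for that field's observed values,
-- and append a warning when the two sets are disjoint.
def coherence_check_py (events : List (List (String × String))) (literals : List (String × List String)) : List String :=
  if events = [] then []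
  else
    ["index", "source", "sourcetype"].foldl (fun warnings field =>
      let declared : PySem.Set String :=
        PySem.Set.ofList (((PySem.Dict.mk literals).getD field []).filter (fun lit => !(PySem.Str.isIn "*" lit)))
      if declared = [] then warnings
      else
        let observed : PySem.Set String :=
          PySem.Set.ofList (events.filterMap (fun e =>
            if (PySem.Dict.mk e).contains field && !((PySem.Dict.mk e).getD field "" == "") then
              some ((PySem.Dict.mk e).getD field "")
            else none))
        if observed = [] then warnings
        else if PySem.Set.isdisjoint declared observed then
          warnings ++ ["SPL references " ++ field ++ "=" ++
            PySem.Str.join ", " (PySem.List.sorted declared (fun x => x) false) ++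
            " but positive fixture events only carry " ++ field ++ "=" ++
            PySem.Str.join ", " (PySem.List.sorted observed (fun x => x) false)]
        else warnings) []

-- ===== PORT B =====
def pvFields : List String := ["index", "source", "sourcetype"]

-- literal transliteration of Source B's helper _check: recursion over the remaining field names;
-- per field, sort the filtered declared literals, early-exit 'any' scan for an event matching
-- one of them, and only in the warning branch build and sort the observed set.
def pvCheck (events : List (List (String × String))) (literals : List (String × List String)) :
    List String → List String
  | [] => []
  | field :: rest =>
    let tail := pvCheck events literals rest
    let declared : List String :=
      PySem.List.sorted ((PySem.Set.ofList ((PySem.Dict.mk literals).getD field [])).filter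
        (fun lit => !(PySem.Str.isIn "*" lit))) (fun x => x) false
    if declared.isEmpty then tail
    else if events.any (fun e =>
        (PySem.Dict.mk e).contains field && !((PySem.Dict.mk e).getD field "" == "") &&
        declared.contains ((PySem.Dict.mk e).getD field "")) then tail
    else
      let observed : List String :=
        PySem.List.sorted (PySem.Set.ofList (events.filterMap (fun e =>
          if (PySem.Dict.mk e).contains field && !((PySem.Dict.mk e).getD field "" == "") then
            some ((PySem.Dict.mk e).getD field "")
          else none))) (fun x => x) false
      if observed.isEmpty then tail
      else
        ("SPL references " ++ field ++ "=" ++ PySem.Str.join ", " declared ++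
          " but positive fixture events only carry " ++ field ++ "=" ++
          PySem.Str.join ", " observed) :: tail

def coherence_check_py_alt (events : List (List (String × String))) (literals : List (String × List String)) : List String :=
  if events = [] then [] else pvCheck events literals pvFields

-- ===== PRECONDITION & SPEC =====
def Spec_coherence_check_py (events : List (List (String × String))) (literals : List (String × List String)) (out : List String) : Prop := out = coherence_check_py_alt events literals
instance (events : List (List (String × String))) (literals : List (String × List String)) (out : List String) : Decidable (Spec_coherence_check_py events literals out) := by unfold Spec_coherence_check_py; infer_instance

-- ===== CLAIM (what is proved, stated in full; the proofs are below) =====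
def Claim_equal_coherence_check_py : Prop := ∀ (events : List (List (String × String))) (literals : List (String × List String)), Dom_coherence_check_py events literals → Spec_coherence_check_py events literals (coherence_check_py events literals)

-- ===== LEMMAS AND PROOFS =====

-- proof-only abbreviations
def pvCond (field : String) (e : List (String × String)) : Bool :=
  (PySem.Dict.mk e).contains field && !((PySem.Dict.mk e).getD field "" == "")

def pvVal (field : String) (e : List (String × String)) : String :=
  (PySem.Dict.mk e).getD field ""

def pvDecl (literals : List (String × List String)) (field : String) : PySem.Set String :=
  PySem.Set.ofList (((PySem.Dict.mk literals).getD field []).filter (fun lit => !(PySem.Str.isIn "*" lit)))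

def pvObsA (events : List (List (String × String))) (field : String) : PySem.Set String :=
  PySem.Set.ofList (events.filterMap (fun e => if pvCond field e then some (pvVal field e) else none))

def pvStepA (events : List (List (String × String))) (literals : List (String × List String))
    (warnings : List String) (field : String) : List String :=
  let declared := pvDecl literals field
  if declared = [] then warnings
  else
    let observed := pvObsA events field
    if observed = [] then warnings
    else if PySem.Set.isdisjoint declared observed then
      warnings ++ ["SPL references " ++ field ++ "=" ++
        PySem.Str.join ", " (PySem.List.sorted declared (fun x => x) false) ++
        " but positive fixture events only carry " ++ field ++ "=" ++
        PySem.Str.join ", " (PySem.List.sorted observed (fun x => x) false)]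
    else warnings

theorem pvA_eq (events : List (List (String × String))) (literals : List (String × List String))
    (h : ¬ events = []) :
    coherence_check_py events literals = pvFields.foldl (pvStepA events literals) [] := by
  simp only [coherence_check_py, if_neg h]
  rfl

-- set(filter) = filter(set): Set.add commutes with List.filter
theorem pv_add_filter (p : String → Bool) (s : PySem.Set String) (x : String) :
    (PySem.Set.add s x).filter p = if p x then PySem.Set.add (s.filter p) x else s.filter p := by
  unfold PySem.Set.add PySem.Set.contains
  by_cases hx : x ∈ s <;> by_cases hp : p x <;>
    simp [hx, hp, List.filter_append, List.mem_filter]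

theorem pv_foldl_add_filter (p : String → Bool) :
    ∀ (l : List String) (s : PySem.Set String),
    (l.foldl PySem.Set.add s).filter p = (l.filter p).foldl PySem.Set.add (s.filter p) := by
  intro l
  induction l with
  | nil => intro s; rfl
  | cons a l ih =>
    intro s
    by_cases hp : p a <;>
      simp [List.foldl_cons, ih, pv_add_filter, hp]

theorem pv_filter_ofList (p : String → Bool) (l : List String) :
    PySem.Set.ofList (l.filter p) = (PySem.Set.ofList l).filter p := by
  rw [PySem.Set.ofList_eq_foldl, PySem.Set.ofList_eq_foldl, pv_foldl_add_filter]
  rfl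

-- membership in A's observed set = existence of a witnessing event
theorem pv_mem_obsA (events : List (List (String × String))) (f x : String) :
    x ∈ pvObsA events f ↔ ∃ e ∈ events, pvCond f e = true ∧ pvVal f e = x := by
  unfold pvObsA
  rw [PySem.Set.mem_ofList, List.mem_filterMap]
  constructor
  · rintro ⟨e, he, hx⟩
    by_cases hc : pvCond f e <;> simp [hc] at hx
    exact ⟨e, he, hc, hx⟩
  · rintro ⟨e, he, hc, hv⟩
    exact ⟨e, he, by simp [hc, hv]⟩

-- B's early-exit 'any' scan is the negation of A's isdisjoint test
theorem pv_any_eq_not_isdisjoint (events : List (List (String × String))) (D : PySem.Set String)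
    (f : String) :
    (events.any (fun e => pvCond f e &&
        (PySem.List.sorted D (fun x => x) false).contains (pvVal f e))) =
      !(PySem.Set.isdisjoint D (pvObsA events f)) := by
  rw [Bool.eq_iff_iff, List.any_eq_true, Bool.not_eq_true', Bool.eq_false_iff, Ne,
    PySem.Set.isdisjoint_iff]
  constructor
  · rintro ⟨e, he, hc⟩ hdisj
    rw [Bool.and_eq_true, List.contains_iff_mem] at hc
    obtain ⟨hcond, hmem⟩ := hc
    have hD := (PySem.List.mem_sorted D (fun x => x) false _).1 hmem
    exact hdisj _ hD ((pv_mem_obsA events f _).2 ⟨e, he, hcond, rfl⟩)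
  · intro h
    push Not at h
    obtain ⟨x, hxD, hxobs⟩ := h
    obtain ⟨e, he, hc, hv⟩ := (pv_mem_obsA events f x).1 hxobs
    refine ⟨e, he, ?_⟩
    rw [Bool.and_eq_true, List.contains_iff_mem]
    subst hv
    exact ⟨hc, (PySem.List.mem_sorted D (fun x => x) false _).2 hxD⟩

-- one field of B's recursion, as a head segment
def pvHeadB (events : List (List (String × String))) (literals : List (String × List String))
    (field : String) : List String :=
  let declared : List String := PySem.List.sorted (pvDecl literals field) (fun x => x) false
  if declared.isEmpty then []
  else if events.any (fun e => pvCond field e && declared.contains (pvVal field e)) then []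
  else
    let observed : List String := PySem.List.sorted (pvObsA events field) (fun x => x) false
    if observed.isEmpty then []
    else
      ["SPL references " ++ field ++ "=" ++ PySem.Str.join ", " declared ++
        " but positive fixture events only carry " ++ field ++ "=" ++
        PySem.Str.join ", " observed]

theorem pvCheck_eq (events : List (List (String × String))) (literals : List (String × List String)) :
    ∀ (fields : List String),
    pvCheck events literals fields =
      fields.foldr (fun f acc => pvHeadB events literals f ++ acc) [] := by
  intro fields
  induction fields with
  | nil => rfl
  | cons f rest ih =>
    show pvCheck events literals (f :: rest) = _
    rw [List.foldr_cons, ← ih]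
    simp only [pvCheck, pvHeadB, pvCond, pvVal, pvDecl, pvObsA, pv_filter_ofList]
    split_ifs <;> simp

theorem pv_step_eq (events : List (List (String × String))) (literals : List (String × List String))
    (w : List String) (f : String) :
    pvStepA events literals w f = w ++ pvHeadB events literals f := by
  simp only [pvStepA, pvHeadB, pv_any_eq_not_isdisjoint]
  set D := pvDecl literals f with hD
  set obs := pvObsA events f with hobs
  by_cases h1 : D = []
  · simp [h1, PySem.List.sorted_eq_nil_iff]
  · have hne : ¬ (PySem.List.sorted D (fun x => x) false).isEmpty := by
      simp [List.isEmpty_iff, PySem.List.sorted_eq_nil_iff, h1]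
    by_cases h2 : obs = []
    · have hdisj : PySem.Set.isdisjoint D obs = true := by
        rw [PySem.Set.isdisjoint_iff]; intro x _ hx; rw [h2] at hx; exact absurd hx (List.not_mem_nil)
      simp [h1, h2, hne, PySem.List.sorted_eq_nil_iff]
    · have hne2 : ¬ (PySem.List.sorted obs (fun x => x) false).isEmpty := by
        simp [List.isEmpty_iff, PySem.List.sorted_eq_nil_iff, h2]
      by_cases h3 : PySem.Set.isdisjoint D obs
      · simp [h1, h2, h3, hne, hne2]
      · simp [h1, h2, h3, hne]

theorem pv_foldl_eq_foldr (events : List (List (String × String))) (literals : List (String × List String)) :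
    ∀ (fields : List String) (w : List String),
    fields.foldl (pvStepA events literals) w =
      w ++ fields.foldr (fun f acc => pvHeadB events literals f ++ acc) [] := by
  intro fields
  induction fields with
  | nil => intro w; simp
  | cons f rest ih =>
    intro w
    rw [List.foldl_cons, pv_step_eq, ih, List.foldr_cons, List.append_assoc]

-- ===== VERDICT (by name: the statement is the Claim_ definition above) =====
theorem coherence_check_py_spec : Claim_equal_coherence_check_py := by
  intro events literals _
  unfold Spec_coherence_check_py
  by_cases h : events = []
  · simp [coherence_check_py, coherence_check_py_alt, h]
  · rw [pvA_eq events literals h, pv_foldl_eq_foldr, List.nil_append]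
    unfold coherence_check_py_alt
    rw [if_neg h, pvCheck_eq]
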